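-- pv_equiv track=rewrite | github.com/0xf07ce/ventty | tools/gen_font_atlas.py | default_cols
-- ===== SOURCE A (Python) =====
-- def default_cols(codepoints: list[int], range_arg: str) -> int:
--     """Pick a sensible column count for the atlas grid."""
--     count = len(codepoints)
--     if range_arg == "cp437":
--         return 32   # 256 / 32 = 8 rows — classic layout
--     if range_arg == "ascii":
--         return 16
--     if range_arg == "hangul":
--         return 128  # 11172 / 128 ≈ 88 rows
--     # Generic: aim for a roughly square-ish atlas capped at a power of two
--     cols = 1
--     while cols * cols < count:
--         cols *= 2
--     return min(cols, 256)
-- ===== SOURCE B (Python) =====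
-- def default_cols(codepoints: list[int], range_arg: str) -> int:
--     """Pick a sensible column count for the atlas grid."""
--     if range_arg == "cp437":
--         return 32
--     if range_arg == "ascii":
--         return 16
--     if range_arg == "hangul":
--         return 128
--     count = len(codepoints)
--     # smallest power of two whose square covers count: 2**ceil(log4(count))
--     k = ((count - 1).bit_length() + 1) // 2 if count > 1 else 0
--     return min(1 << k, 256)
-- ===== Notes on version B (the rewrite author's own statement) =====
-- stated objective: alternative
-- what changed: Replaces the doubling while-loop with a closed-form bit-length computation: the answer is 2**ceil(log4(count)) obtained from (count-1).bit_length(), then capped at 256.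
import Mathlib
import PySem

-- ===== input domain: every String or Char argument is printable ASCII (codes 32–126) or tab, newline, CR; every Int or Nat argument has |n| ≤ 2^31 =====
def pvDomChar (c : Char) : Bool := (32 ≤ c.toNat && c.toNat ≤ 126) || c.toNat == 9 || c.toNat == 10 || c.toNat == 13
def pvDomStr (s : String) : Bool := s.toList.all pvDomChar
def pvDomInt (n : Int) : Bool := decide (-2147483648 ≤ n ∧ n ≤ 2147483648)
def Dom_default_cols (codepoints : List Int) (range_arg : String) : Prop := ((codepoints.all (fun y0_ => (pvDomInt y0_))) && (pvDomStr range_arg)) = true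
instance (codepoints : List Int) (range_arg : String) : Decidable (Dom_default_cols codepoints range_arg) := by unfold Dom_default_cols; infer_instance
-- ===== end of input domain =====

-- B replaces A's doubling while-loop by a closed-form bit-length computation of the
-- smallest power of two whose square covers count (alternative decomposition, same cost class).

-- ===== PORT A =====
-- A's `while cols*cols < count: cols *= 2` as fuel recursion; fuel = count always suffices
-- (proved below), so this is a faithful step-for-step port of the loop.
def pvLoopA : Nat → Nat → Nat → Nat
  | 0, _, cols => cols
  | fuel+1, count, cols => if cols * cols < count then pvLoopA fuel count (cols * 2) else cols

def default_cols (codepoints : List Int) (range_arg : String) : Int :=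
  let count := codepoints.length
  if range_arg == "cp437" then 32
  else if range_arg == "ascii" then 16
  else if range_arg == "hangul" then 128
  else ((min (pvLoopA count count 1) 256 : Nat) : Int)

-- ===== PORT B =====
-- Source B: k = ((count-1).bit_length() + 1) // 2 if count > 1 else 0; min(1 << k, 256).
-- Python n.bit_length() on n ≥ 0 is Nat.size; 1 << k is 2^k.
def default_cols_alt (codepoints : List Int) (range_arg : String) : Int :=
  if range_arg == "cp437" then 32
  else if range_arg == "ascii" then 16
  else if range_arg == "hangul" then 128
  else
    let count := codepoints.length
    let k := if 1 < count then (Nat.size (count - 1) + 1) / 2 else 0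
    ((min (2 ^ k) 256 : Nat) : Int)

-- ===== PRECONDITION & SPEC =====
def Spec_default_cols (codepoints : List Int) (range_arg : String) (out : Int) : Prop := out = default_cols_alt codepoints range_arg
instance (codepoints : List Int) (range_arg : String) (out : Int) : Decidable (Spec_default_cols codepoints range_arg out) := by unfold Spec_default_cols; infer_instance

-- ===== CLAIM (what is proved, stated in full; the proofs are below) =====
def Claim_equal_default_cols : Prop := ∀ (codepoints : List Int) (range_arg : String), Dom_default_cols codepoints range_arg → Spec_default_cols codepoints range_arg (default_cols codepoints range_arg)

-- ===== LEMMAS AND PROOFS =====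

-- The loop, given enough fuel, lands on cols·2^t with (cols·2^t)² ≥ count, minimally so.
theorem pvLoopA_spec : ∀ (fuel count cols : Nat), 0 < cols →
    count ≤ (cols * 2 ^ fuel) * (cols * 2 ^ fuel) →
    ∃ t, pvLoopA fuel count cols = cols * 2 ^ t ∧
      count ≤ (cols * 2 ^ t) * (cols * 2 ^ t) ∧
      (t = 0 ∨ (cols * 2 ^ (t - 1)) * (cols * 2 ^ (t - 1)) < count) := by
  intro fuel
  induction fuel with
  | zero =>
    intro count cols hc h
    exact ⟨0, by simp [pvLoopA], by simpa using h, Or.inl rfl⟩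
  | succ fuel ih =>
    intro count cols hc h
    by_cases hlt : cols * cols < count
    · have h' : count ≤ ((cols * 2) * 2 ^ fuel) * ((cols * 2) * 2 ^ fuel) := by
        have : cols * 2 ^ (fuel + 1) = (cols * 2) * 2 ^ fuel := by ring
        rwa [this] at h
      obtain ⟨t', e, h2, h3⟩ := ih count (cols * 2) (by omega) h'
      refine ⟨t' + 1, ?_, ?_, Or.inr ?_⟩
      · have : pvLoopA (fuel + 1) count cols = pvLoopA fuel count (cols * 2) := by
          simp [pvLoopA, hlt]
        rw [this, e]; ring
      · have : (cols * 2) * 2 ^ t' = cols * 2 ^ (t' + 1) := by ring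
        rwa [this] at h2
      · simp only [Nat.add_sub_cancel]
        rcases Nat.eq_zero_or_pos t' with h0 | h0
        · subst h0; simpa using hlt
        · obtain ⟨u, rfl⟩ : ∃ u, t' = u + 1 := ⟨t' - 1, by omega⟩
          rcases h3 with h3 | h3
          · omega
          · simp only [Nat.add_sub_cancel] at h3
            have e2 : cols * 2 * 2 ^ u = cols * 2 ^ (u + 1) := by rw [pow_succ]; ring
            rwa [e2] at h3
    · exact ⟨0, by simp [pvLoopA, hlt], by simpa using Nat.le_of_not_lt hlt, Or.inl rfl⟩

-- Any two minimal exponents coincide.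
theorem pvExp_uniq_half (n t t' : Nat) (hlt : t < t')
    (h1 : n ≤ 2 ^ t * 2 ^ t)
    (h4 : t' = 0 ∨ 2 ^ (t' - 1) * 2 ^ (t' - 1) < n) : False := by
  rcases h4 with h4 | h4
  · omega
  · have hle : 2 ^ t ≤ 2 ^ (t' - 1) := Nat.pow_le_pow_right (by norm_num) (by omega)
    have := Nat.mul_le_mul hle hle
    omega

theorem pvExp_uniq (n t t' : Nat)
    (h1 : n ≤ 2 ^ t * 2 ^ t) (h2 : t = 0 ∨ 2 ^ (t - 1) * 2 ^ (t - 1) < n)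
    (h3 : n ≤ 2 ^ t' * 2 ^ t') (h4 : t' = 0 ∨ 2 ^ (t' - 1) * 2 ^ (t' - 1) < n) : t = t' := by
  rcases lt_trichotomy t t' with h | h | h
  · exact absurd (pvExp_uniq_half n t t' h h1 h4) (fun x => x)
  · exact h
  · exact absurd (pvExp_uniq_half n t' t h h3 h2) (fun x => x)

-- B's exponent satisfies the same minimality properties.
theorem pvKB_props (n : Nat) :
    n ≤ 2 ^ (if 1 < n then (Nat.size (n - 1) + 1) / 2 else 0) * 2 ^ (if 1 < n then (Nat.size (n - 1) + 1) / 2 else 0) ∧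
    ((if 1 < n then (Nat.size (n - 1) + 1) / 2 else 0) = 0 ∨
      2 ^ ((if 1 < n then (Nat.size (n - 1) + 1) / 2 else 0) - 1) * 2 ^ ((if 1 < n then (Nat.size (n - 1) + 1) / 2 else 0) - 1) < n) := by
  by_cases hn : 1 < n
  · simp only [if_pos hn]
    set s := Nat.size (n - 1) with hs
    have hlt : n - 1 < 2 ^ s := Nat.lt_size_self (n - 1)
    have hs1 : 1 ≤ s := by
      have : 0 < Nat.size (n - 1) := Nat.lt_size.mpr (by simpa using Nat.one_le_iff_ne_zero.mpr (by omega))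
      omega
    set k := (s + 1) / 2 with hk
    have hk1 : 1 ≤ k := by omega
    have h2k : s ≤ k + k := by omega
    have h2k' : (k - 1) + (k - 1) ≤ s - 1 := by omega
    constructor
    · have : 2 ^ s ≤ 2 ^ (k + k) := Nat.pow_le_pow_right (by norm_num) h2k
      calc n ≤ 2 ^ s := by omega
        _ ≤ 2 ^ (k + k) := this
        _ = 2 ^ k * 2 ^ k := by rw [pow_add]
    · refine Or.inr ?_
      have hsz : ¬ (n - 1 < 2 ^ (s - 1)) := by
        intro hcon
        have := Nat.size_le.mpr hcon
        omega
      have h1 : 2 ^ ((k - 1) + (k - 1)) ≤ 2 ^ (s - 1) := Nat.pow_le_pow_right (by norm_num) h2k'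
      have : 2 ^ (k - 1) * 2 ^ (k - 1) = 2 ^ ((k - 1) + (k - 1)) := by rw [pow_add]
      omega
  · simp only [if_neg hn]
    exact ⟨by simpa using Nat.le_of_not_lt hn, by simp⟩

theorem pvLoop_closed (n : Nat) :
    pvLoopA n n 1 = 2 ^ (if 1 < n then (Nat.size (n - 1) + 1) / 2 else 0) := by
  have hfuel : n ≤ (1 * 2 ^ n) * (1 * 2 ^ n) := by
    have h1 : n < 2 ^ n := Nat.lt_two_pow_self
    have h2 : 1 ≤ 2 ^ n := Nat.one_le_two_pow
    calc n ≤ 2 ^ n := le_of_lt h1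
      _ = 1 * 2 ^ n := (one_mul _).symm
      _ ≤ (1 * 2 ^ n) * (1 * 2 ^ n) := Nat.le_mul_of_pos_left _ (by omega)
  obtain ⟨t, e, h2, h3⟩ := pvLoopA_spec n n 1 (by omega) hfuel
  simp only [one_mul] at e h2 h3
  obtain ⟨b1, b2⟩ := pvKB_props n
  rw [e]
  exact congrArg (2 ^ ·) (pvExp_uniq n t _ h2 h3 b1 b2)

-- ===== VERDICT (by name: the statement is the Claim_ definition above) =====
theorem default_cols_spec : Claim_equal_default_cols := by
  intro codepoints range_arg _
  unfold Spec_default_cols default_cols default_cols_alt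
  by_cases h1 : range_arg == "cp437" <;> simp only [h1, Bool.false_eq_true, if_false, if_true]
  by_cases h2 : range_arg == "ascii" <;> simp only [h2, Bool.false_eq_true, if_false, if_true]
  by_cases h3 : range_arg == "hangul" <;> simp only [h3, Bool.false_eq_true, if_false, if_true]
  rw [pvLoop_closed]
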